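-- pv_equiv track=rewrite | github.com/SerafimBatzoglou/concept-synth | src/concept_synth/abduction/evaluate_abd_b1.py | _count_missing_trailing_parens
-- ===== SOURCE A (Python) =====
-- def _count_missing_trailing_parens(alpha_sexpr: str) -> int:
--     """Count how many trailing ')' would be needed to balance the formula."""
--     balance = 0
--     for ch in alpha_sexpr:
--         if ch == "(":
--             balance += 1
--         elif ch == ")":
--             balance -= 1
--             if balance < 0:
--                 return 0
--     return balance if balance > 0 else 0
-- ===== SOURCE B (Python) =====
-- def _count_missing_trailing_parens(alpha_sexpr: str) -> int:
--     """Count how many trailing ')' would be needed to balance the formula."""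
--     deltas = [1 if ch == "(" else (-1 if ch == ")" else 0) for ch in alpha_sexpr]
--     prefixes = []
--     running = 0
--     for d in deltas:
--         running += d
--         prefixes.append(running)
--     if not prefixes:
--         return 0
--     return 0 if min(prefixes) < 0 else prefixes[-1]
-- ===== Notes on version B (the rewrite author's own statement) =====
-- stated objective: alternative
-- what changed: Replaces A's single early-exit scan (return 0 the moment balance dips below zero, else max(balance,0)) with a build-then-aggregate shape: map characters to +1/-1/0 deltas, build the full list of running prefix balances, then answer 0 if the minimum prefix is negative and otherwise the last prefix.
import Mathlib
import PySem

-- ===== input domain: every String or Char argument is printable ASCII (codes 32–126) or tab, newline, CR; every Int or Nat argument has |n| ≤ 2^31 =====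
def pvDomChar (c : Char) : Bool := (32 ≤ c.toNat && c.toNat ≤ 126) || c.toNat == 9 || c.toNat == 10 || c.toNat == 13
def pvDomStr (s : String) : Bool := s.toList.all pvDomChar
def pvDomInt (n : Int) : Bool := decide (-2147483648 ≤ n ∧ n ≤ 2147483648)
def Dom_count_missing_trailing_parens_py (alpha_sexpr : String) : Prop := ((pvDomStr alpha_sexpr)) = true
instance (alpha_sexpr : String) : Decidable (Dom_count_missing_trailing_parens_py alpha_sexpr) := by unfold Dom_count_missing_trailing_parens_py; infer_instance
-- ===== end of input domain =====

-- B replaces A's early-exit scan by a build-then-aggregate pass (delta map, prefix balances, min/last); same cost, alternative decomposition.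

-- ===== PORT A =====
-- A's loop with its early 'return 0': structural recursion over the characters carrying balance.
def pvGoA : List Char → Int → Int
  | [], balance => if balance > 0 then balance else 0
  | ch :: rest, balance =>
    if ch = '(' then pvGoA rest (balance + 1)
    else if ch = ')' then
      (if balance - 1 < 0 then 0 else pvGoA rest (balance - 1))
    else pvGoA rest balance

def count_missing_trailing_parens_py (alpha_sexpr : String) : Int :=
  pvGoA alpha_sexpr.toList 0

-- ===== PORT B =====
def pvDelta (ch : Char) : Int := if ch = '(' then 1 else if ch = ')' then -1 else 0

-- the prefix-balance list built by Source B's accumulation loop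
def pvPrefixes : List Int → Int → List Int
  | [], _ => []
  | d :: ds, running => (running + d) :: pvPrefixes ds (running + d)

def count_missing_trailing_parens_py_alt (alpha_sexpr : String) : Int :=
  let deltas := alpha_sexpr.toList.map pvDelta
  let prefixes := pvPrefixes deltas 0
  match prefixes with
  | [] => 0
  -- min(prefixes) / prefixes[-1] on the nonempty list, ported by hand (exact for Int lists):
  | p :: ps => if List.foldl min p ps < 0 then 0 else List.getLastD ps p

-- ===== PRECONDITION & SPEC =====
def Spec_count_missing_trailing_parens_py (alpha_sexpr : String) (out : Int) : Prop := out = count_missing_trailing_parens_py_alt alpha_sexpr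
instance (alpha_sexpr : String) (out : Int) : Decidable (Spec_count_missing_trailing_parens_py alpha_sexpr out) := by unfold Spec_count_missing_trailing_parens_py; infer_instance

-- ===== CLAIM (what is proved, stated in full; the proofs are below) =====
def Claim_equal_count_missing_trailing_parens_py : Prop := ∀ (alpha_sexpr : String), Dom_count_missing_trailing_parens_py alpha_sexpr → Spec_count_missing_trailing_parens_py alpha_sexpr (count_missing_trailing_parens_py alpha_sexpr)

-- ===== LEMMAS AND PROOFS =====

lemma foldl_min_neg (L : List Int) (a : Int) :
    List.foldl min a L < 0 ↔ (a < 0 ∨ ∃ x ∈ L, x < 0) := by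
  induction L generalizing a with
  | nil => simp
  | cons x L ih =>
    rw [List.foldl_cons, ih]
    simp only [min_lt_iff, List.mem_cons]
    constructor
    · rintro (⟨h | h⟩ | ⟨y, hy, hlt⟩)
      · exact Or.inl h
      · exact Or.inr ⟨x, Or.inl rfl, h⟩
      · exact Or.inr ⟨y, Or.inr hy, hlt⟩
    · rintro (h | ⟨y, hy | hy, hlt⟩)
      · exact Or.inl (Or.inl h)
      · exact Or.inl (Or.inr (hy ▸ hlt))
      · exact Or.inr ⟨y, hy, hlt⟩

lemma foldl_min_neg_congr (L : List Int) {a a' : Int} (h : a < 0 ↔ a' < 0) :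
    (List.foldl min a L < 0 ↔ List.foldl min a' L < 0) := by
  rw [foldl_min_neg, foldl_min_neg]; tauto

lemma pvGoA_eq (cs : List Char) (b : Int) (hb : 0 ≤ b) :
    pvGoA cs b =
      (if List.foldl min b (pvPrefixes (cs.map pvDelta) b) < 0 then 0
       else List.getLastD (pvPrefixes (cs.map pvDelta) b) b) := by
  induction cs generalizing b with
  | nil =>
    simp only [pvGoA, List.map_nil, pvPrefixes, List.foldl_nil, List.getLastD_nil]
    omega
  | cons ch rest ih =>
    by_cases hp : ch = '('
    · subst hp
      have e1 : pvGoA ('(' :: rest) b = pvGoA rest (b + 1) := by simp [pvGoA]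
      have e2 : ('(' :: rest).map pvDelta = 1 :: rest.map pvDelta := by simp [pvDelta]
      rw [e1, e2]
      simp only [pvPrefixes, List.foldl_cons, List.getLastD_cons]
      rw [ih (b + 1) (by omega)]
      exact if_congr (foldl_min_neg_congr _ (by omega)) rfl rfl
    · by_cases hc : ch = ')'
      · subst hc
        have e1 : pvGoA (')' :: rest) b =
            (if b - 1 < 0 then 0 else pvGoA rest (b - 1)) := by simp [pvGoA]
        have e2 : (')' :: rest).map pvDelta = (-1) :: rest.map pvDelta := by simp [pvDelta]
        rw [e1, e2]
        simp only [pvPrefixes, List.foldl_cons, List.getLastD_cons]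
        have hb1 : b + -1 = b - 1 := by ring
        rw [hb1]
        by_cases hz : b - 1 < 0
        · rw [if_pos hz, if_pos (by rw [foldl_min_neg]; left; omega)]
        · rw [if_neg hz]
          have hm : min b (b - 1) = b - 1 := by omega
          rw [hm]
          exact ih (b - 1) (by omega)
      · have e1 : pvGoA (ch :: rest) b = pvGoA rest b := by simp [pvGoA, hp, hc]
        have e2 : (ch :: rest).map pvDelta = 0 :: rest.map pvDelta := by
          simp [pvDelta, hp, hc]
        rw [e1, e2]
        simp only [pvPrefixes, List.foldl_cons, List.getLastD_cons, add_zero, min_self]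
        exact ih b hb

-- ===== VERDICT (by name: the statement is the Claim_ definition above) =====
theorem count_missing_trailing_parens_py_spec : Claim_equal_count_missing_trailing_parens_py := by
  intro s _
  show count_missing_trailing_parens_py s = count_missing_trailing_parens_py_alt s
  have halt : count_missing_trailing_parens_py_alt s =
      (match pvPrefixes (s.toList.map pvDelta) 0 with
       | [] => (0 : Int)
       | p :: ps => if List.foldl min p ps < 0 then 0 else List.getLastD ps p) := rfl
  rw [halt]
  unfold count_missing_trailing_parens_py
  rw [pvGoA_eq s.toList 0 le_rfl]
  cases h : pvPrefixes (s.toList.map pvDelta) 0 with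
  | nil => simp
  | cons p ps =>
    show (if List.foldl min 0 (p :: ps) < 0 then 0 else List.getLastD (p :: ps) 0) =
      (if List.foldl min p ps < 0 then 0 else List.getLastD ps p)
    simp only [List.foldl_cons, List.getLastD_cons]
    exact if_congr (foldl_min_neg_congr ps (by omega)) rfl rfl
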